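-- pv_equiv track=rewrite | github.com/eliottcassidy2000/math | 04-computation/key_identity_ocf_connection.py | count_endpoint_stats
-- ===== SOURCE A (Python) =====
-- from itertools import permutations
--
-- def count_endpoint_stats(T, n):
--     """Compute B_b and E_b for each vertex b."""
--     B = [0] * n  # B[b] = paths starting at b
--     E = [0] * n  # E[b] = paths ending at b
--     for perm in permutations(range(n)):
--         prod = 1
--         for k in range(n-1):
--             prod *= T.get((perm[k], perm[k+1]), 0)
--         if prod > 0:
--             B[perm[0]] += 1
--             E[perm[-1]] += 1
--     return B, E
-- ===== SOURCE B (Python) =====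
-- def count_endpoint_stats(T, n):
--     """Compute B_b and E_b for each vertex b."""
--     verts = list(range(n))
--
--     def dfs(last, remaining, neg, rev):
--         # number of orderings of `remaining` extending the partial path ending
--         # at `last` (edges looked up forwards, or backwards when rev) whose
--         # total weight product is positive; neg = sign parity so far.
--         if not remaining:
--             return 0 if neg else 1
--         total = 0
--         for v in remaining:
--             w = T.get((v, last) if rev else (last, v), 0)
--             if w != 0:
--                 total += dfs(v, [u for u in remaining if u != v], neg != (w < 0), rev)
--         return total
--
--     B = [dfs(s, [u for u in verts if u != s], False, False) for s in verts]
--     E = [dfs(e, [u for u in verts if u != e], False, True) for e in verts]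
--     return B, E
-- ===== Notes on version B (the rewrite author's own statement) =====
-- stated objective: faster
-- what changed: A enumerates all n! permutations and multiplies full edge-weight products; B counts positive-product Hamiltonian paths by a pruning depth-first search over partial paths per start vertex, tracking only the sign parity and cutting off at the first zero-weight edge, and obtains endpoint counts by running the same DFS with reversed edge lookups.
import Mathlib
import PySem

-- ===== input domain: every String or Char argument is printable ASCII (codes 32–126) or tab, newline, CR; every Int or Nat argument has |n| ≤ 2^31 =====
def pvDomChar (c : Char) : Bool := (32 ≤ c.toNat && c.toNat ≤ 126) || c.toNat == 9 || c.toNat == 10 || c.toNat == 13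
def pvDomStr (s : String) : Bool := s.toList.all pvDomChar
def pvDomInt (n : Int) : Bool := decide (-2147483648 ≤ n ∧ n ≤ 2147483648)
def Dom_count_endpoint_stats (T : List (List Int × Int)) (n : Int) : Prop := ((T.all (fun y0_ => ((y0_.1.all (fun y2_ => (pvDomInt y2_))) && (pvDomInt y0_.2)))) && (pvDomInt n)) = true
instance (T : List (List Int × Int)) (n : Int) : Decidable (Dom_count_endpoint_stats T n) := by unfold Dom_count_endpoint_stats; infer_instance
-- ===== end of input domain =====

-- B replaces A's brute-force scan over all n! permutations by a pruning DFS over partial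
-- paths (per start vertex, tracking only the sign parity; endpoint counts via the same DFS
-- on reversed edge lookups); equivalence of the RETURN value is proved for n ≥ 1.

-- ===== PORT A =====
def count_endpoint_stats (T : List (List Int × Int)) (n : Int) : List Int × List Int :=
  let B := PySem.List.pyRepeat [(0 : Int)] n
  let E := PySem.List.pyRepeat [(0 : Int)] n
  let verts := PySem.List.pyRange 0 n 1
  (PySem.List.permutations verts verts.length).foldl
    (fun (st : List Int × List Int) perm =>
      let prod := (PySem.List.pyRange 0 (n - 1) 1).foldl
        (fun p k => p * (PySem.Dict.mk T).getD
          [PySem.List.pyGetD perm k 0, PySem.List.pyGetD perm (k + 1) 0] 0) 1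
      if prod > 0 then
        (PySem.List.pySetD st.1 (PySem.List.pyGetD perm 0 0)
           (PySem.List.pyGetD st.1 (PySem.List.pyGetD perm 0 0) 0 + 1),
         PySem.List.pySetD st.2 (PySem.List.pyGetD perm (-1) 0)
           (PySem.List.pyGetD st.2 (PySem.List.pyGetD perm (-1) 0) 0 + 1))
      else st)
    (B, E)

-- ===== PORT B =====
def dfsB (T : List (List Int × Int)) (last : Int) (remaining : List Int) (neg : Bool) (rev : Bool) : Int :=
  if remaining = [] then (if neg then 0 else 1)
  else
    remaining.attach.foldl
      (fun total v =>
        let w := (PySem.Dict.mk T).getD (if rev then [v.1, last] else [last, v.1]) 0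
        if w ≠ 0 then
          total + dfsB T v.1 (remaining.filter (fun u => u != v.1)) (neg != decide (w < 0)) rev
        else total) 0
termination_by remaining.length
decreasing_by
  have h1 : (List.filter (fun u => u != v.1) remaining).length < remaining.length :=
    List.length_filter_lt_length_iff_exists.mpr ⟨v.1, v.2, by simp⟩
  simpa using h1

def count_endpoint_stats_alt (T : List (List Int × Int)) (n : Int) : List Int × List Int :=
  let verts := PySem.List.pyRange 0 n 1
  (verts.map (fun s => dfsB T s (verts.filter (fun u => u != s)) false false),
   verts.map (fun e => dfsB T e (verts.filter (fun u => u != e)) false true))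

-- ===== PRECONDITION & SPEC =====
-- Pre_ excludes exactly n ≤ 0, where A raises IndexError (perm[0] on the empty permutation).
def Pre_count_endpoint_stats (T : List (List Int × Int)) (n : Int) : Prop := 1 ≤ n
instance (T : List (List Int × Int)) (n : Int) : Decidable (Pre_count_endpoint_stats T n) := by unfold Pre_count_endpoint_stats; infer_instance
def pvWitness_count_endpoint_stats : (List (List Int × Int)) × Int := ([([0, 1], 2)], 2)

def Spec_count_endpoint_stats (T : List (List Int × Int)) (n : Int) (out : List Int × List Int) : Prop := out = count_endpoint_stats_alt T n
instance (T : List (List Int × Int)) (n : Int) (out : List Int × List Int) : Decidable (Spec_count_endpoint_stats T n out) := by unfold Spec_count_endpoint_stats; infer_instance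

-- ===== CLAIM (what is proved, stated in full; the proofs are below) =====
def Claim_equal_count_endpoint_stats : Prop := ∀ (T : List (List Int × Int)) (n : Int), Dom_count_endpoint_stats T n → Pre_count_endpoint_stats T n → Spec_count_endpoint_stats T n (count_endpoint_stats T n)

-- ===== LEMMAS AND PROOFS =====

-- weight of the directed step a → b (backwards lookup when rev), as both programs read it
def wgt (T : List (List Int × Int)) (rev : Bool) (a b : Int) : Int :=
  (PySem.Dict.mk T).getD (if rev then [b, a] else [a, b]) 0

-- weights along a full path (consecutive pairs)
def chainP (T : List (List Int × Int)) (rev : Bool) : List Int → List Int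
  | [] => []
  | [_] => []
  | x :: y :: t => wgt T rev x y :: chainP T rev (y :: t)

-- the per-permutation acceptance test, written as B's DFS evaluates it along one branch
def goodB (T : List (List Int × Int)) (rev : Bool) : Int → List Int → Bool → Bool
  | _, [], neg => !neg
  | last, v :: p, neg =>
      (wgt T rev last v != 0) && goodB T rev v p (neg != decide (wgt T rev last v < 0))

def allNZ (ws : List Int) : Bool := ws.all (fun x => x != 0)
def oddNeg (ws : List Int) : Bool := (ws.countP (fun x => decide (x < 0))) % 2 == 1

theorem oddNeg_cons (w : Int) (ws : List Int) :
    oddNeg (w :: ws) = (decide (w < 0) != oddNeg ws) := by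
  simp only [oddNeg, List.countP_cons]
  by_cases h : w < 0 <;>
    rcases Nat.mod_two_eq_zero_or_one (ws.countP fun x => decide (x < 0)) with h2 | h2 <;>
    simp [h, Nat.add_mod, h2]

theorem nz_cons {w : Int} {t : List Int} (hw : w ≠ 0) (hnz : ∀ x ∈ t, x ≠ 0) :
    ∀ x ∈ w :: t, x ≠ 0 := by
  intro x hx
  rcases List.mem_cons.mp hx with rfl | hx
  · exact hw
  · exact hnz x hx

theorem prod_sign (ws : List Int) :
    (0 < ws.prod ↔ (∀ x ∈ ws, x ≠ 0) ∧ oddNeg ws = false) ∧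
    (ws.prod < 0 ↔ (∀ x ∈ ws, x ≠ 0) ∧ oddNeg ws = true) := by
  induction ws with
  | nil => simp [oddNeg]
  | cons w t ih =>
    obtain ⟨ihp, ihn⟩ := ih
    constructor
    · rw [List.prod_cons, mul_pos_iff, oddNeg_cons, ihp, ihn]
      constructor
      · rintro (⟨hw, hnz, ho⟩ | ⟨hw, hnz, ho⟩) <;>
          exact ⟨nz_cons (by omega) hnz, by simp [ho]; omega⟩
      · rintro ⟨hnz, ho⟩
        have hw : w ≠ 0 := hnz w (by simp)
        by_cases hwn : w < 0
        · right
          refine ⟨hwn, ?_⟩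
          simp [hwn] at ho
          exact ⟨fun x hx => hnz x (by simp [hx]), ho⟩
        · left
          refine ⟨by omega, ?_⟩
          simp [hwn] at ho
          exact ⟨fun x hx => hnz x (by simp [hx]), ho⟩
    · rw [List.prod_cons, mul_neg_iff, oddNeg_cons, ihp, ihn]
      constructor
      · rintro (⟨hw, hnz, ho⟩ | ⟨hw, hnz, ho⟩) <;>
          exact ⟨nz_cons (by omega) hnz, by simp [ho]; omega⟩
      · rintro ⟨hnz, ho⟩
        have hw : w ≠ 0 := hnz w (by simp)
        by_cases hwn : w < 0
        · right
          refine ⟨hwn, ?_⟩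
          simp [hwn] at ho
          exact ⟨fun x hx => hnz x (by simp [hx]), ho⟩
        · left
          refine ⟨by omega, ?_⟩
          simp [hwn] at ho
          exact ⟨fun x hx => hnz x (by simp [hx]), ho⟩

theorem goodB_eq (T : List (List Int × Int)) (rev : Bool) :
    ∀ (p : List Int) (last : Int) (neg : Bool),
    goodB T rev last p neg = (allNZ (chainP T rev (last :: p)) && (neg == oddNeg (chainP T rev (last :: p)))) := by
  intro p
  induction p with
  | nil => intro last neg; simp [goodB, chainP, allNZ, oddNeg]
  | cons v q ih =>
    intro last neg
    show goodB T rev last (v :: q) neg = _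
    rw [show chainP T rev (last :: v :: q) = wgt T rev last v :: chainP T rev (v :: q) from rfl]
    rw [show goodB T rev last (v :: q) neg
        = ((wgt T rev last v != 0) && goodB T rev v q (neg != decide (wgt T rev last v < 0))) from rfl]
    rw [ih v (neg != decide (wgt T rev last v < 0))]
    rw [oddNeg_cons]
    simp only [allNZ, List.all_cons]
    cases h1 : (wgt T rev last v != 0) <;>
      cases neg <;> cases hd : decide (wgt T rev last v < 0) <;>
      cases ho : oddNeg (chainP T rev (v :: q)) <;> simp [hd, ho] <;> rfl

theorem prod_pos_iff (ws : List Int) : decide (0 < ws.prod) = (allNZ ws && !oddNeg ws) := by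
  have h := (prod_sign ws).1
  by_cases hp : 0 < ws.prod
  · have := h.mp hp
    simp [hp, allNZ, this.2, List.all_eq_true]
    intro x hx
    simpa using this.1 x hx
  · simp only [hp, decide_false]
    by_cases ha : allNZ ws = true
    · have hnz : ∀ x ∈ ws, x ≠ 0 := by
        intro x hx
        have := (List.all_eq_true.mp ha) x hx
        simpa using this
      have ho : oddNeg ws = true := by
        by_contra hoc
        exact hp (h.mpr ⟨hnz, by simpa using hoc⟩)
      simp [ha, ho]
    · have ha' : allNZ ws = false := by simpa using ha
      simp [ha']

theorem chainP_snoc (T : List (List Int × Int)) (rev : Bool) :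
    ∀ (xs : List Int) (a : Int),
    chainP T rev (xs ++ [a]) =
      chainP T rev xs ++ (match xs.getLast? with | none => [] | some u => [wgt T rev u a]) := by
  intro xs
  induction xs with
  | nil => intro a; simp [chainP]
  | cons x t ih =>
    intro a
    cases t with
    | nil => simp [chainP]
    | cons y s =>
      have : ((x :: y :: s) ++ [a]) = x :: ((y :: s) ++ [a]) := by simp
      rw [this]
      show wgt T rev x y :: chainP T rev ((y :: s) ++ [a]) = _
      rw [ih a]
      simp [chainP, List.getLast?_cons_cons]

theorem wgt_flip (T : List (List Int × Int)) (a b : Int) : wgt T false a b = wgt T true b a := by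
  simp [wgt]

theorem chainP_reverse (T : List (List Int × Int)) :
    ∀ (q : List Int), chainP T false q.reverse = (chainP T true q).reverse := by
  intro q
  induction q with
  | nil => simp [chainP]
  | cons x t ih =>
    cases t with
    | nil => simp [chainP]
    | cons y s =>
      have h1 : (x :: y :: s).reverse = (y :: s).reverse ++ [x] := by simp
      rw [h1, chainP_snoc]
      have h2 : (y :: s).reverse.getLast? = some y := by
        rw [List.getLast?_reverse]; rfl
      rw [h2, ih]
      show (chainP T true (y :: s)).reverse ++ [wgt T false y x] = (chainP T true (x :: y :: s)).reverse
      rw [show chainP T true (x :: y :: s) = wgt T true x y :: chainP T true (y :: s) from rfl]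
      rw [List.reverse_cons, wgt_flip]

theorem eraseIdx_eq_filter (l : List Int) :
    ∀ (i : ℕ) (h : i < l.length), l.Nodup → l.eraseIdx i = l.filter (fun u => u != l[i]) := by
  induction l with
  | nil => intro i h; simp at h
  | cons x t ih =>
    intro i h hnd
    cases i with
    | zero =>
      simp only [List.eraseIdx_cons_zero, List.getElem_cons_zero, List.filter_cons]
      have hx : (x != x) = false := by simp
      rw [hx]
      have : t.filter (fun u => u != x) = t := by
        apply List.filter_eq_self.mpr
        intro a ha
        have : x ∉ t := (List.nodup_cons.mp hnd).1
        simp only [bne_iff_ne, ne_eq, decide_eq_true_eq]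
        rintro rfl
        exact this ha
      simp [this]
    | succ j =>
      have hj : j < t.length := by simpa using h
      have hnd' : t.Nodup := (List.nodup_cons.mp hnd).2
      simp only [List.eraseIdx_cons_succ, List.getElem_cons_succ, List.filter_cons]
      have hxne : (x != t[j]) = true := by
        have hx : x ∉ t := (List.nodup_cons.mp hnd).1
        simp only [bne_iff_ne, ne_eq]
        rintro rfl
        exact hx (List.getElem_mem hj)
      simp [hxne, ih j hj hnd']

theorem map_range_getD {β : Type} (l : List Int) (f : Int → β) :
    (List.range l.length).map (fun i => f (l.getD i 0)) = l.map f := by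
  induction l with
  | nil => simp
  | cons x t ih =>
    rw [show (x :: t).length = t.length + 1 from rfl, List.range_succ_eq_map, List.map_cons,
      List.map_map, List.map_cons]
    congr 1

theorem sum_if_unique (c : ℕ) (b : Int) :
    ∀ (l : List Int), l.Nodup → b ∈ l →
    (l.map (fun v => if v = b then c else 0)).sum = c := by
  intro l
  induction l with
  | nil => intro _ h; simp at h
  | cons x t ih =>
    intro hnd hb
    rcases List.mem_cons.mp hb with rfl | hb
    · have hx : b ∉ t := (List.nodup_cons.mp hnd).1
      have hz : (t.map (fun v => if v = b then c else 0)).sum = 0 := by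
        apply List.sum_eq_zero
        intro y hy
        rcases List.mem_map.mp hy with ⟨v, hv, rfl⟩
        have : v ≠ b := fun h => hx (h ▸ hv)
        simp [this]
      simp [hz]
    · have hxb : x ≠ b := by
        have hx : x ∉ t := (List.nodup_cons.mp hnd).1
        rintro rfl
        exact hx hb
      simp only [List.map_cons, List.sum_cons, if_neg hxb, Nat.zero_add]
      exact ih (List.nodup_cons.mp hnd).2 hb

theorem mem_permutations_iff : ∀ (l : List Int), l.Nodup → ∀ (p : List Int),
    (p ∈ PySem.List.permutations l l.length ↔ p.Perm l) := by
  intro l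
  induction hn : l.length using Nat.strong_induction_on generalizing l with
  | _ n ih =>
  intro hl p
  cases n with
  | zero =>
    have : l = [] := List.length_eq_zero_iff.mp hn
    subst this
    simp [PySem.List.permutations_zero]
  | succ m =>
    rw [PySem.List.permutations_succ, List.mem_flatMap]
    constructor
    · rintro ⟨i, hi, hp⟩
      have hilt : i < l.length := List.mem_range.mp hi
      rw [List.getElem?_eq_getElem hilt] at hp
      simp only [List.mem_map] at hp
      obtain ⟨q, hq, rfl⟩ := hp
      have hm : (l.eraseIdx i).length = m := by
        rw [List.length_eraseIdx]; simp [hilt]; omega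
      have hq' : q.Perm (l.eraseIdx i) :=
        (ih m (by omega) (l.eraseIdx i) hm ((List.Nodup.eraseIdx i) hl) q).mp hq
      exact (List.Perm.cons _ hq').trans (List.getElem_cons_eraseIdx_perm hilt)
    · intro hp
      have hplen : p.length = m + 1 := by rw [List.Perm.length_eq hp, hn]
      cases p with
      | nil => simp at hplen
      | cons v q =>
        have hv : v ∈ l := (List.Perm.mem_iff hp).mp (by simp)
        have hi : l.idxOf v < l.length := List.idxOf_lt_length_of_mem hv
        refine ⟨l.idxOf v, List.mem_range.mpr hi, ?_⟩
        rw [List.getElem?_eq_getElem hi, List.getElem_idxOf hi]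
        simp only [List.mem_map]
        have hq : q.Perm (l.erase v) := (List.cons_perm_iff_perm_erase.mp hp).2
        have heq : l.eraseIdx (l.idxOf v) = l.erase v := by
          rw [eraseIdx_eq_filter l _ hi hl, List.getElem_idxOf hi, List.Nodup.erase_eq_filter hl]
        have hm : (l.eraseIdx (l.idxOf v)).length = m := by
          rw [List.length_eraseIdx]; simp [hi]; omega
        exact ⟨q, (ih m (by omega) _ hm ((List.Nodup.eraseIdx _) hl) q).mpr (heq ▸ hq), rfl⟩

theorem nodup_permutations : ∀ (l : List Int), l.Nodup →
    (PySem.List.permutations l l.length).Nodup := by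
  intro l
  induction hn : l.length using Nat.strong_induction_on generalizing l with
  | _ n ih =>
  intro hl
  cases n with
  | zero =>
    have : l = [] := List.length_eq_zero_iff.mp hn
    subst this
    simp [PySem.List.permutations_zero]
  | succ m =>
    rw [PySem.List.permutations_succ]
    rw [List.nodup_flatMap]
    constructor
    · intro i hi
      have hilt : i < l.length := List.mem_range.mp hi
      rw [List.getElem?_eq_getElem hilt]
      have hm : (l.eraseIdx i).length = m := by
        rw [List.length_eraseIdx]; simp [hilt]; omega
      exact (ih m (by omega) (l.eraseIdx i) hm ((List.Nodup.eraseIdx i) hl)).map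
        (fun p q h => by injection h)
    · have hpl : (List.range l.length).Pairwise (· < ·) := List.pairwise_lt_range
      refine List.Pairwise.imp_of_mem ?_ hpl
      intro i j hi hj hlt
      have hilt : i < l.length := List.mem_range.mp hi
      have hjlt : j < l.length := List.mem_range.mp hj
      rw [Function.onFun]
      rw [List.getElem?_eq_getElem hilt, List.getElem?_eq_getElem hjlt]
      intro x hx hy
      rcases List.mem_map.mp hx with ⟨q, _, rfl⟩
      rcases List.mem_map.mp hy with ⟨q', _, he⟩
      have : l[j] = l[i] := by injection he
      have := (List.Nodup.getElem_inj_iff hl).mp this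
      omega

theorem countP_perm_reverse (l : List Int) (hl : l.Nodup) (Q : List Int → Bool) :
    (PySem.List.permutations l l.length).countP Q
      = (PySem.List.permutations l l.length).countP (fun p => Q p.reverse) := by
  have hmap : ((PySem.List.permutations l l.length).map List.reverse).Perm
      (PySem.List.permutations l l.length) := by
    rw [List.perm_ext_iff_of_nodup ((nodup_permutations l hl).map
      (fun p q h => by simpa using congrArg List.reverse h)) (nodup_permutations l hl)]
    intro p
    rw [List.mem_map]
    constructor
    · rintro ⟨q, hq, rfl⟩
      rw [mem_permutations_iff l hl]
      exact (List.reverse_perm q).trans ((mem_permutations_iff l hl q).mp hq)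
    · intro hp
      refine ⟨p.reverse, ?_, by simp⟩
      rw [mem_permutations_iff l hl]
      exact (List.reverse_perm p).trans ((mem_permutations_iff l hl p).mp hp)
  calc (PySem.List.permutations l l.length).countP Q
      = ((PySem.List.permutations l l.length).map List.reverse).countP Q := (List.Perm.countP_eq _ hmap).symm
    _ = (PySem.List.permutations l l.length).countP (Q ∘ List.reverse) := List.countP_map
    _ = _ := rfl

theorem dfs_eq (T : List (List Int × Int)) (rev : Bool) :
    ∀ (l : List Int), l.Nodup → ∀ (last : Int) (neg : Bool),
    dfsB T last l neg rev
      = ((PySem.List.permutations l l.length).countP (fun p => goodB T rev last p neg) : ℤ) := by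
  intro l
  induction hn : l.length using Nat.strong_induction_on generalizing l with
  | _ n ih =>
  intro hl last neg
  cases n with
  | zero =>
    have : l = [] := List.length_eq_zero_iff.mp hn
    subst this
    cases neg <;> simp [dfsB, goodB, PySem.List.permutations_zero]
  | succ m =>
    have hne : l ≠ [] := by intro h; subst h; simp at hn
    rw [dfsB, if_neg hne]
    have hstep : (fun (total : Int) (v : {x // x ∈ l}) =>
        let w := (PySem.Dict.mk T).getD (if rev then [v.1, last] else [last, v.1]) 0
        if w ≠ 0 then
          total + dfsB T v.1 (l.filter (fun u => u != v.1)) (neg != decide (w < 0)) rev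
        else total)
        = (fun total v =>
          total + (if wgt T rev last v.1 ≠ 0 then
            dfsB T v.1 (l.filter (fun u => u != v.1)) (neg != decide (wgt T rev last v.1 < 0)) rev
          else 0)) := by
      funext total v
      simp only [wgt]
      split_ifs <;> first | rfl | simp
    rw [hstep, PySem.List.foldl_add, List.attach_map_val
      (f := fun v => (if wgt T rev last v ≠ 0 then
        dfsB T v (l.filter (fun u => u != v)) (neg != decide (wgt T rev last v < 0)) rev
      else 0))]
    rw [PySem.List.permutations_succ, List.countP_flatMap]
    rw [Nat.cast_list_sum, List.map_map]
    refine Eq.trans ?_ (congrArg List.sum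
      (List.map_congr_left (g := fun i => ((fun v => (if wgt T rev last v ≠ 0 then
        dfsB T v (l.filter (fun u => u != v)) (neg != decide (wgt T rev last v < 0)) rev
      else 0)) (l.getD i 0))) ?_)).symm
    · rw [map_range_getD l (fun v => (if wgt T rev last v ≠ 0 then
        dfsB T v (l.filter (fun u => u != v)) (neg != decide (wgt T rev last v < 0)) rev
      else 0))]
      simp
    · intro i hi
      have hilt : i < l.length := List.mem_range.mp hi
      simp only [Function.comp, List.getElem?_eq_getElem hilt, List.getD_eq_getElem _ _ hilt]
      rw [List.countP_map]
      by_cases hw : wgt T rev last l[i] = 0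
      · have hz : (PySem.List.permutations (l.eraseIdx i) m).countP
            ((fun p => goodB T rev last p neg) ∘ fun p => l[i] :: p) = 0 := by
          apply List.countP_eq_zero.mpr
          intro p _
          simp [Function.comp, goodB, hw]
        rw [hz]
        simp [hw]
      · have hflt : l.eraseIdx i = l.filter (fun u => u != l[i]) := eraseIdx_eq_filter l i hilt hl
        have hm : (l.filter (fun u => u != l[i])).length = m := by
          rw [← hflt, List.length_eraseIdx]
          simp [hilt]; omega
        have hcong : (PySem.List.permutations (l.eraseIdx i) m).countP
            ((fun p => goodB T rev last p neg) ∘ fun p => l[i] :: p)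
            = (PySem.List.permutations (l.eraseIdx i) m).countP
              (fun p => goodB T rev l[i] p (neg != decide (wgt T rev last l[i] < 0))) := by
          apply List.countP_congr
          intro p _
          simp [Function.comp, goodB, hw]
        rw [hcong, hflt, ← hm]
        rw [ih m (by omega) _ hm (hl.filter _) l[i] (neg != decide (wgt T rev last l[i] < 0))]
        rw [hm]
        simp [hw]

theorem countP_head (l : List Int) (hl : l.Nodup) (b : Int) (hb : b ∈ l) (Q : List Int → Bool)
    (hQ : ∀ (v : Int) (p : List Int), v ≠ b → Q (v :: p) = false) :
    (PySem.List.permutations l l.length).countP Q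
      = (PySem.List.permutations (l.filter (fun u => u != b)) (l.length - 1)).countP (fun p => Q (b :: p)) := by
  have hlen : l.length = (l.length - 1) + 1 := by
    have : 0 < l.length := List.length_pos_of_mem hb
    omega
  rw [hlen, PySem.List.permutations_succ, List.countP_flatMap, ← hlen]
  set C : ℕ := (PySem.List.permutations (l.filter (fun u => u != b)) (l.length - 1)).countP
      (fun p => Q (b :: p)) with hC
  refine Eq.trans (congrArg List.sum
    (List.map_congr_left (g := fun i => if l.getD i 0 = b then C else 0) ?_)) ?_
  · intro i hi
    have hilt : i < l.length := List.mem_range.mp hi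
    simp only [Function.comp, List.getElem?_eq_getElem hilt, List.getD_eq_getElem _ _ hilt]
    rw [List.countP_map]
    by_cases hib : l[i] = b
    · rw [if_pos hib, hC, ← hib, eraseIdx_eq_filter l i hilt hl]
      rfl
    · rw [if_neg hib]
      apply List.countP_eq_zero.mpr
      intro p _
      simp [Function.comp, hQ l[i] p hib]
  · rw [map_range_getD l (fun v => if v = b then C else 0)]
    exact sum_if_unique C b l hl hb

theorem pyGetD_pySetD_int (xs : List Int) (i : Int) (hi : 0 ≤ i) (j : ℕ) (hj : j < xs.length) (v : Int) :
    PySem.List.pyGetD (PySem.List.pySetD xs i v) (j : Int) 0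
      = if i = (j : Int) then v else PySem.List.pyGetD xs (j : Int) 0 := by
  rw [PySem.List.pySetD_of_nonneg xs v hi]
  by_cases h : i = (j : Int)
  · subst h
    simp [PySem.List.pyGetD_natCast, List.getElem?_set_self, hj, List.getD_eq_getElem?_getD]
  · rw [if_neg h]
    have hne : i.toNat ≠ j := by omega
    simp [PySem.List.pyGetD_natCast, List.getD_eq_getElem?_getD, List.getElem?_set_ne hne]

theorem bump_fold (idx : List Int → Int) (c : List Int → Bool) :
    ∀ (ps : List (List Int)) (Ba : List Int) (j : ℕ), j < Ba.length → (∀ p ∈ ps, 0 ≤ idx p) →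
    PySem.List.pyGetD
      (ps.foldl (fun acc p => if c p then PySem.List.pySetD acc (idx p) (PySem.List.pyGetD acc (idx p) 0 + 1) else acc) Ba)
      (j : Int) 0
    = PySem.List.pyGetD Ba (j : Int) 0 + ((ps.countP (fun p => c p && (idx p == (j : Int)))) : ℤ) := by
  intro ps
  induction ps with
  | nil => intro Ba j _ _; simp
  | cons p t ih =>
    intro Ba j hj hpos
    rw [List.foldl_cons, List.countP_cons]
    have hpos' : ∀ q ∈ t, 0 ≤ idx q := fun q hq => hpos q (by simp [hq])
    by_cases hc : c p
    · rw [if_pos hc]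
      rw [ih _ j (by rw [PySem.List.length_pySetD]; exact hj) hpos']
      rw [pyGetD_pySetD_int Ba (idx p) (hpos p (by simp)) j hj]
      by_cases hij : idx p = (j : Int)
      · simp [hij, hc]
        ring
      · have : (idx p == (j : Int)) = false := by simp [hij]
        simp [hij, hc, this]
    · rw [if_neg hc]
      rw [ih _ j hj hpos']
      have : (c p && (idx p == (j : Int))) = false := by simp [hc]
      simp [this]

theorem bump_fold_len (idx : List Int → Int) (c : List Int → Bool) :
    ∀ (ps : List (List Int)) (Ba : List Int),
    (ps.foldl (fun acc p => if c p then PySem.List.pySetD acc (idx p) (PySem.List.pyGetD acc (idx p) 0 + 1) else acc) Ba).length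
      = Ba.length := by
  intro ps
  induction ps with
  | nil => intro Ba; rfl
  | cons p t ih =>
    intro Ba
    rw [List.foldl_cons, ih]
    split_ifs
    · exact PySem.List.length_pySetD _ _ _
    · rfl


theorem fold_wgt (T : List (List Int × Int)) :
    ∀ (q : List Int) (x : Int) (acc : Int),
    (List.range ((x :: q).length - 1)).foldl
      (fun pr k => pr * wgt T false ((x :: q).getD k 0) ((x :: q).getD (k + 1) 0)) acc
    = (chainP T false (x :: q)).foldl (· * ·) acc := by
  intro q
  induction q with
  | nil => intro x acc; simp [chainP]
  | cons y s ih =>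
    intro x acc
    have h1 : (x :: y :: s).length - 1 = s.length + 1 := rfl
    rw [h1, List.range_succ_eq_map, List.foldl_cons, List.foldl_map]
    have h2 : ∀ (pr : Int) (k : ℕ), k ∈ List.range s.length →
        pr * wgt T false ((x :: y :: s).getD (Nat.succ k) 0) ((x :: y :: s).getD (Nat.succ k + 1) 0)
        = pr * wgt T false ((y :: s).getD k 0) ((y :: s).getD (k + 1) 0) := by
      intro pr k _
      rfl
    rw [PySem.List.foldl_congr_mem _ _ _ _ h2]
    have h3 : (x :: y :: s).getD 0 0 = x := rfl
    have h4 : (x :: y :: s).getD 1 0 = y := rfl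
    rw [h3, h4]
    have ih' := ih y (acc * wgt T false x y)
    rw [show (y :: s).length - 1 = s.length from rfl] at ih'
    rw [ih']
    rfl

theorem goodB_false (T : List (List Int × Int)) (rev : Bool) (v : Int) (q : List Int) :
    goodB T rev v q false = (allNZ (chainP T rev (v :: q)) && !oddNeg (chainP T rev (v :: q))) := by
  rw [goodB_eq]
  cases h : oddNeg (chainP T rev (v :: q)) <;> simp [h]

theorem condA_eq (T : List (List Int × Int)) (n : Int) (hn : 1 ≤ n)
    (p : List Int) (hp : p ≠ []) (hplen : p.length = n.toNat) :
    decide (0 < (PySem.List.pyRange 0 (n - 1) 1).foldl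
      (fun pr k => pr * (PySem.Dict.mk T).getD
        [PySem.List.pyGetD p k 0, PySem.List.pyGetD p (k + 1) 0] 0) 1)
    = (allNZ (chainP T false p) && !oddNeg (chainP T false p)) := by
  obtain ⟨v, q, rfl⟩ := List.exists_cons_of_ne_nil hp
  have h0 : PySem.List.pyRange 0 (n - 1) 1 = (List.range (n - 1).toNat).map (fun k : ℕ => (k : Int)) :=
    PySem.List.pyRange_zero (n - 1)
  rw [h0, List.foldl_map]
  have h2 : ∀ (pr : Int) (k : ℕ), k ∈ List.range (n - 1).toNat →
      pr * (PySem.Dict.mk T).getD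
        [PySem.List.pyGetD (v :: q) (k : Int) 0, PySem.List.pyGetD (v :: q) ((k : Int) + 1) 0] 0
      = pr * wgt T false ((v :: q).getD k 0) ((v :: q).getD (k + 1) 0) := by
    intro pr k _
    have hcast : ((k : Int) + 1) = ((k + 1 : ℕ) : Int) := by push_cast; ring
    rw [hcast, PySem.List.pyGetD_natCast, PySem.List.pyGetD_natCast]
    rfl
  rw [PySem.List.foldl_congr_mem _ _ _ _ h2]
  have h3 : (n - 1).toNat = (v :: q).length - 1 := by
    rw [hplen]; omega
  rw [h3, fold_wgt, ← List.prod_eq_foldl]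
  exact prod_pos_iff (chainP T false (v :: q))

theorem col_eq (T : List (List Int × Int)) (n : Int) (rev : Bool) (j : ℕ)
    (hj : (j : Int) < n) :
    (((PySem.List.permutations (PySem.List.pyRange 0 n 1) (PySem.List.pyRange 0 n 1).length).countP
      (fun p => match p with
        | [] => false
        | v :: q => (v == (j : Int)) && goodB T rev v q false)) : ℤ)
    = dfsB T (j : Int) ((PySem.List.pyRange 0 n 1).filter (fun u => u != (j : Int))) false rev := by
  have hnd : (PySem.List.pyRange 0 n 1).Nodup := PySem.List.nodup_pyRange_one _ _
  have hmem : (j : Int) ∈ PySem.List.pyRange 0 n 1 :=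
    PySem.List.mem_pyRange_one.mpr ⟨by omega, hj⟩
  rw [countP_head (PySem.List.pyRange 0 n 1) hnd ((j : Int)) hmem _
    (by intro v p hv; simp [hv])]
  have hflen : ((PySem.List.pyRange 0 n 1).filter (fun u => u != (j : Int))).length
      = (PySem.List.pyRange 0 n 1).length - 1 := by
    rw [← List.Nodup.erase_eq_filter hnd, List.length_erase_of_mem hmem]
  rw [dfs_eq T rev _ (hnd.filter _) ((j : Int)) false, hflen]
  exact congrArg Nat.cast (List.countP_congr (fun p _ => by simp))


def condA (T : List (List Int × Int)) (n : Int) (perm : List Int) : Bool :=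
  decide (0 < (PySem.List.pyRange 0 (n - 1) 1).foldl
    (fun p k => p * (PySem.Dict.mk T).getD
      [PySem.List.pyGetD perm k 0, PySem.List.pyGetD perm (k + 1) 0] 0) 1)

def bump (c : List Int → Bool) (idx : List Int → Int) (acc : List Int) (p : List Int) : List Int :=
  if c p then PySem.List.pySetD acc (idx p) (PySem.List.pyGetD acc (idx p) 0 + 1) else acc

def idx0 (p : List Int) : Int := PySem.List.pyGetD p 0 0
def idxm1 (p : List Int) : Int := PySem.List.pyGetD p (-1) 0

theorem bump_fold' (idx : List Int → Int) (c : List Int → Bool) (ps : List (List Int))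
    (Ba : List Int) (j : ℕ) (hj : j < Ba.length) (hpos : ∀ p ∈ ps, 0 ≤ idx p) :
    PySem.List.pyGetD (ps.foldl (bump c idx) Ba) (j : Int) 0
      = PySem.List.pyGetD Ba (j : Int) 0 + ((ps.countP (fun p => c p && (idx p == (j : Int)))) : ℤ) :=
  bump_fold idx c ps Ba j hj hpos

theorem bump_fold_len' (idx : List Int → Int) (c : List Int → Bool) (ps : List (List Int))
    (Ba : List Int) : (ps.foldl (bump c idx) Ba).length = Ba.length :=
  bump_fold_len idx c ps Ba

theorem allNZ_reverse (ws : List Int) : allNZ ws.reverse = allNZ ws := by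
  simp [allNZ]

theorem oddNeg_reverse (ws : List Int) : oddNeg ws.reverse = oddNeg ws := by
  simp [oddNeg]

-- ===== VERDICT (by name: the statement is the Claim_ definition above) =====
theorem count_endpoint_stats_spec : Claim_equal_count_endpoint_stats := by
  intro T n _ hpre
  have hn : 1 ≤ n := hpre
  unfold Spec_count_endpoint_stats
  unfold count_endpoint_stats count_endpoint_stats_alt
  show (PySem.List.permutations (PySem.List.pyRange 0 n 1) (PySem.List.pyRange 0 n 1).length).foldl
      (fun (st : List Int × List Int) perm =>
        if 0 < (PySem.List.pyRange 0 (n - 1) 1).foldl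
            (fun p k => p * (PySem.Dict.mk T).getD
              [PySem.List.pyGetD perm k 0, PySem.List.pyGetD perm (k + 1) 0] 0) 1 then
          (PySem.List.pySetD st.1 (PySem.List.pyGetD perm 0 0)
            (PySem.List.pyGetD st.1 (PySem.List.pyGetD perm 0 0) 0 + 1),
           PySem.List.pySetD st.2 (PySem.List.pyGetD perm (-1) 0)
            (PySem.List.pyGetD st.2 (PySem.List.pyGetD perm (-1) 0) 0 + 1))
        else st)
      (PySem.List.pyRepeat [(0 : Int)] n, PySem.List.pyRepeat [(0 : Int)] n)
    = ((PySem.List.pyRange 0 n 1).map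
        (fun s => dfsB T s ((PySem.List.pyRange 0 n 1).filter (fun u => u != s)) false false),
       (PySem.List.pyRange 0 n 1).map
        (fun e => dfsB T e ((PySem.List.pyRange 0 n 1).filter (fun u => u != e)) false true))
  have hvlen : (PySem.List.pyRange 0 n 1).length = n.toNat := by
    rw [PySem.List.length_pyRange_one]; simp
  have hnd : (PySem.List.pyRange 0 n 1).Nodup := PySem.List.nodup_pyRange_one _ _
  have hB0 : PySem.List.pyRepeat [(0 : Int)] n = List.replicate n.toNat (0 : Int) :=
    PySem.List.pyRepeat_singleton _ _
  have hsplit : (fun (st : List Int × List Int) perm =>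
        if 0 < (PySem.List.pyRange 0 (n - 1) 1).foldl
            (fun p k => p * (PySem.Dict.mk T).getD
              [PySem.List.pyGetD perm k 0, PySem.List.pyGetD perm (k + 1) 0] 0) 1 then
          (PySem.List.pySetD st.1 (PySem.List.pyGetD perm 0 0)
            (PySem.List.pyGetD st.1 (PySem.List.pyGetD perm 0 0) 0 + 1),
           PySem.List.pySetD st.2 (PySem.List.pyGetD perm (-1) 0)
            (PySem.List.pyGetD st.2 (PySem.List.pyGetD perm (-1) 0) 0 + 1))
        else st)
      = (fun st perm => (bump (condA T n) idx0 st.1 perm, bump (condA T n) idxm1 st.2 perm)) := by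
    funext st perm
    simp only [bump, idx0, idxm1, condA]
    by_cases h : 0 < (PySem.List.pyRange 0 (n - 1) 1).foldl
        (fun p k => p * (PySem.Dict.mk T).getD
          [PySem.List.pyGetD perm k 0, PySem.List.pyGetD perm (k + 1) 0] 0) 1
    · simp [h]
    · simp [h]
  rw [hsplit, PySem.List.foldl_prod_mk (f := bump (condA T n) idx0) (g := bump (condA T n) idxm1)]
  -- facts about members of the permutation list
  have hperm : ∀ p ∈ PySem.List.permutations (PySem.List.pyRange 0 n 1) (PySem.List.pyRange 0 n 1).length,
      p.Perm (PySem.List.pyRange 0 n 1) ∧ p.length = n.toNat ∧ p ≠ [] := by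
    intro p hp
    have hpp := (mem_permutations_iff _ hnd p).mp hp
    have hplen : p.length = n.toNat := by rw [hpp.length_eq, hvlen]
    refine ⟨hpp, hplen, ?_⟩
    intro hnil
    rw [hnil] at hplen
    simp at hplen
    omega
  have hpos0 : ∀ p ∈ PySem.List.permutations (PySem.List.pyRange 0 n 1) (PySem.List.pyRange 0 n 1).length,
      0 ≤ idx0 p := by
    intro p hp
    obtain ⟨hpp, hplen, hpne⟩ := hperm p hp
    obtain ⟨v, q, rfl⟩ := List.exists_cons_of_ne_nil hpne
    have h1 : idx0 (v :: q) = v := PySem.List.pyGetD_zero_cons _ _ _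
    rw [h1]
    have hv : v ∈ PySem.List.pyRange 0 n 1 := hpp.mem_iff.mp (List.mem_cons_self)
    exact (PySem.List.mem_pyRange_one.mp hv).1
  have hposm1 : ∀ p ∈ PySem.List.permutations (PySem.List.pyRange 0 n 1) (PySem.List.pyRange 0 n 1).length,
      0 ≤ idxm1 p := by
    intro p hp
    obtain ⟨hpp, hplen, hpne⟩ := hperm p hp
    have h1 : idxm1 p = p.getLast hpne := PySem.List.pyGetD_neg_one p 0 hpne
    rw [h1]
    have hv : p.getLast hpne ∈ PySem.List.pyRange 0 n 1 := hpp.mem_iff.mp (List.getLast_mem hpne)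
    exact (PySem.List.mem_pyRange_one.mp hv).1
  rw [Prod.ext_iff]
  constructor
  · -- B column
    apply List.ext_getElem
    · rw [bump_fold_len', hB0, List.length_replicate, List.length_map, hvlen]
    · intro j hj1 hj2
      have hjn : j < n.toNat := by
        rw [bump_fold_len', hB0, List.length_replicate] at hj1; exact hj1
      have hL : (List.foldl (bump (condA T n) idx0) (PySem.List.pyRepeat [(0 : Int)] n)
          (PySem.List.permutations (PySem.List.pyRange 0 n 1) (PySem.List.pyRange 0 n 1).length))[j]'hj1
          = PySem.List.pyGetD (List.foldl (bump (condA T n) idx0) (PySem.List.pyRepeat [(0 : Int)] n)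
            (PySem.List.permutations (PySem.List.pyRange 0 n 1) (PySem.List.pyRange 0 n 1).length)) (j : Int) 0 := by
        rw [PySem.List.pyGetD_natCast, List.getD_eq_getElem]
      rw [hL, bump_fold' idx0 (condA T n) _ _ j (by rw [hB0, List.length_replicate]; exact hjn) hpos0]
      have hB0j : PySem.List.pyGetD (PySem.List.pyRepeat [(0 : Int)] n) (j : Int) 0 = 0 := by
        rw [hB0, PySem.List.pyGetD_natCast]
        simp
      have hcnt : (PySem.List.permutations (PySem.List.pyRange 0 n 1) (PySem.List.pyRange 0 n 1).length).countP
            (fun p => condA T n p && (idx0 p == (j : Int)))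
          = (PySem.List.permutations (PySem.List.pyRange 0 n 1) (PySem.List.pyRange 0 n 1).length).countP
            (fun p => match p with
              | [] => false
              | v :: q => (v == (j : Int)) && goodB T false v q false) := by
        apply List.countP_congr
        intro p hp
        obtain ⟨hpp, hplen, hpne⟩ := hperm p hp
        obtain ⟨v, q, rfl⟩ := List.exists_cons_of_ne_nil hpne
        have hbool : (condA T n (v :: q) && (idx0 (v :: q) == (j : Int)))
            = ((v == (j : Int)) && goodB T false v q false) := by
          rw [show idx0 (v :: q) = v from PySem.List.pyGetD_zero_cons _ _ _]
          have hcA : condA T n (v :: q)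
              = (allNZ (chainP T false (v :: q)) && !oddNeg (chainP T false (v :: q))) := by
            simp only [condA]
            exact condA_eq T n hn (v :: q) (List.cons_ne_nil _ _) hplen
          rw [hcA, ← goodB_false]
          exact Bool.and_comm _ _
        rw [hbool]
      rw [hB0j, hcnt, zero_add, List.getElem_map]
      have hvj : (PySem.List.pyRange 0 n 1)[j]'(by rw [hvlen]; exact hjn) = (j : Int) := by
        rw [PySem.List.getElem_pyRange_one]
        simp
      rw [hvj]
      exact col_eq T n false j (by omega)
  · -- E column
    apply List.ext_getElem
    · rw [bump_fold_len', hB0, List.length_replicate, List.length_map, hvlen]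
    · intro j hj1 hj2
      have hjn : j < n.toNat := by
        rw [bump_fold_len', hB0, List.length_replicate] at hj1; exact hj1
      have hL : (List.foldl (bump (condA T n) idxm1) (PySem.List.pyRepeat [(0 : Int)] n)
          (PySem.List.permutations (PySem.List.pyRange 0 n 1) (PySem.List.pyRange 0 n 1).length))[j]'hj1
          = PySem.List.pyGetD (List.foldl (bump (condA T n) idxm1) (PySem.List.pyRepeat [(0 : Int)] n)
            (PySem.List.permutations (PySem.List.pyRange 0 n 1) (PySem.List.pyRange 0 n 1).length)) (j : Int) 0 := by
        rw [PySem.List.pyGetD_natCast, List.getD_eq_getElem]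
      rw [hL, bump_fold' idxm1 (condA T n) _ _ j (by rw [hB0, List.length_replicate]; exact hjn) hposm1]
      have hB0j : PySem.List.pyGetD (PySem.List.pyRepeat [(0 : Int)] n) (j : Int) 0 = 0 := by
        rw [hB0, PySem.List.pyGetD_natCast]
        simp
      have hcnt : (PySem.List.permutations (PySem.List.pyRange 0 n 1) (PySem.List.pyRange 0 n 1).length).countP
            (fun p => condA T n p && (idxm1 p == (j : Int)))
          = (PySem.List.permutations (PySem.List.pyRange 0 n 1) (PySem.List.pyRange 0 n 1).length).countP
            (fun p => match p with
              | [] => false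
              | v :: q => (v == (j : Int)) && goodB T true v q false) := by
        rw [countP_perm_reverse _ hnd]
        apply List.countP_congr
        intro p hp
        obtain ⟨hpp, hplen, hpne⟩ := hperm p hp
        obtain ⟨v, q, rfl⟩ := List.exists_cons_of_ne_nil hpne
        have hbool : (condA T n (v :: q).reverse && (idxm1 (v :: q).reverse == (j : Int)))
            = ((v == (j : Int)) && goodB T true v q false) := by
          have hi : idxm1 (v :: q).reverse = v := by
            rw [List.reverse_cons]
            exact PySem.List.pyGetD_neg_one_append_singleton _ _ _
          rw [hi]
          have hcA : condA T n (v :: q).reverse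
              = (allNZ (chainP T true (v :: q)) && !oddNeg (chainP T true (v :: q))) := by
            simp only [condA]
            rw [condA_eq T n hn (v :: q).reverse (by simp) (by rw [List.length_reverse]; exact hplen)]
            rw [chainP_reverse, allNZ_reverse, oddNeg_reverse]
          rw [hcA, ← goodB_false]
          exact Bool.and_comm _ _
        rw [hbool]
      rw [hB0j, hcnt, zero_add, List.getElem_map]
      have hvj : (PySem.List.pyRange 0 n 1)[j]'(by rw [hvlen]; exact hjn) = (j : Int) := by
        rw [PySem.List.getElem_pyRange_one]
        simp
      rw [hvj]
      exact col_eq T n true j (by omega)
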